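-- pv_equiv track=rewrite | github.com/mwibrow/vlnm | vlnm/plots.py | translate_props
-- ===== SOURCE A (Python) =====
-- def translate_props(props, prop_translator):
--     renamed_props = {}
--     for prop, value in props.items():
--         if prop in prop_translator:
--             names = prop_translator[prop]
--             if names is None:
--                 continue
--             names = names if isinstance(names, list) else [names]
--             for name in names:
--                 renamed_props.update(
--                     **translate_props({name: value}, prop_translator))
--         else:
--             renamed_props[prop] = value
--     return renamed_props
-- ===== SOURCE B (Python) =====
-- def translate_props(props, prop_translator):
--     renamed_props = {}
--     for prop, value in props.items():
--         stack = [prop]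
--         while stack:
--             name = stack.pop()
--             if name in prop_translator:
--                 names = prop_translator[name]
--                 if names is None:
--                     continue
--                 names = names if isinstance(names, list) else [names]
--                 stack.extend(reversed(names))
--             else:
--                 renamed_props[name] = value
--     return renamed_props
-- ===== Notes on version B (the rewrite author's own statement) =====
-- stated objective: alternative
-- what changed: Replaces A's recursion (one recursive call, temporary one-entry dict and dict.update(**...) kwargs-merge per alias name) with an explicit stack-based worklist per property that writes into the result dict directly, preserving A's DFS order; Pre_ excludes only cyclic alias maps, where A raises RecursionError.
import Mathlib
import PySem

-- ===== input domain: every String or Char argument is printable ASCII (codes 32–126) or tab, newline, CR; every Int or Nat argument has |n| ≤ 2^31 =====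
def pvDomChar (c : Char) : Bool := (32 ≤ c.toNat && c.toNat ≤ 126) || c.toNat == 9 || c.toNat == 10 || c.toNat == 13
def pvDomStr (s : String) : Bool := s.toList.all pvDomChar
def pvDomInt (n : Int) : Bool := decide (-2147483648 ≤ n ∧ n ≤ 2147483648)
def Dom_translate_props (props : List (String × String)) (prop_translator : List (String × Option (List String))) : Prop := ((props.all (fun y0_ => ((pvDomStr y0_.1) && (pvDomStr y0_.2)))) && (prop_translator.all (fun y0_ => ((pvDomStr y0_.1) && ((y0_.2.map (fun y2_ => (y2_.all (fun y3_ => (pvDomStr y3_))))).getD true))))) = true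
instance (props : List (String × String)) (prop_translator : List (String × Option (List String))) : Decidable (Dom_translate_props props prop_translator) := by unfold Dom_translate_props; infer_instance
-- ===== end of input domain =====

-- B replaces A's recursion with an explicit stack-based worklist (alternative decomposition, same cost);
-- equivalence is about the RETURN value (neither program mutates its arguments).

-- ===== PORT A =====
-- Literal port of A's recursion; the Nat argument is only a totality guard (fuel): under
-- Pre_translate_props (terminating alias expansion) every alias chain has length at most
-- prop_translator.length + 1, so fuel prop_translator.length + 3 is never exhausted there.
def translateA (tr : List (String × Option (List String))) :
    Nat → List (String × String) → PySem.Dict String String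
  | 0, _ => PySem.Dict.empty   -- fuel exhausted: unreachable under Pre_translate_props
  | fuel+1, props =>
    props.foldl (fun renamed pv =>
      match (PySem.Dict.mk tr).get? pv.1 with        -- 'if prop in prop_translator: names = prop_translator[prop]'
      | some none => renamed                          -- 'if names is None: continue'
      | some (some names) =>                          -- names is always a list here (translator values are Optional[list])
          names.foldl (fun r name =>
            r.update (translateA tr fuel [(name, pv.2)]).items) renamed   -- 'renamed_props.update(**translate_props({name: value}, ...))'
      | none => renamed.insert pv.1 pv.2) PySem.Dict.empty                -- 'renamed_props[prop] = value'

def translate_props (props : List (String × String)) (prop_translator : List (String × Option (List String))) : List (String × String) :=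
  (translateA prop_translator (prop_translator.length + 3) props).items

-- ===== PORT B =====
-- fuel bound for B's while-loop (totality guard only; the Python loop has none): an upper bound
-- on the number of pops when alias expansion terminates.
def bFuel (prop_translator : List (String × Option (List String))) : Nat :=
  ((prop_translator.map (fun p => (p.2.getD []).length)).sum + 1) ^ (prop_translator.length + 3)

-- B's 'while stack:' loop; the Lean stack's HEAD is the Python list's END (the top), so
-- 'stack.extend(reversed(names))' followed by pops is 'names ++ stack'.
def bLoop (tr : List (String × Option (List String))) (value : String) :
    Nat → List String → PySem.Dict String String → PySem.Dict String String
  | _, [], res => res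
  | 0, _, res => res   -- fuel exhausted: unreachable under Pre_translate_props
  | fuel+1, name :: stack, res =>
    match (PySem.Dict.mk tr).get? name with
    | some none => bLoop tr value fuel stack res
    | some (some names) => bLoop tr value fuel (names ++ stack) res
    | none => bLoop tr value fuel stack (res.insert name value)

def translate_props_alt (props : List (String × String)) (prop_translator : List (String × Option (List String))) : List (String × String) :=
  (props.foldl (fun res pv => bLoop prop_translator pv.2 (bFuel prop_translator) [pv.1] res)
    PySem.Dict.empty).items

-- ===== PRECONDITION & SPEC =====
-- 'aliasBounded tr f k = true' says every alias-expansion chain starting at k ends within f steps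
-- (a property of the translator's alias graph only; it mentions neither port).
def aliasBounded (tr : List (String × Option (List String))) : Nat → String → Bool
  | 0, k =>
    match (PySem.Dict.mk tr).get? k with
    | some (some _) => false
    | _ => true
  | f+1, k =>
    match (PySem.Dict.mk tr).get? k with
    | some (some ns) => ns.all (aliasBounded tr f)
    | _ => true

-- Pre_ excludes exactly the inputs whose alias expansion does not terminate (a cyclic alias
-- reachable from some property): there A raises RecursionError. On a terminating expansion every
-- chain ends within prop_translator.length + 1 steps, so Pre_ admits every input A returns on.
def Pre_translate_props (props : List (String × String)) (prop_translator : List (String × Option (List String))) : Prop :=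
  ∀ pv ∈ props, aliasBounded prop_translator (prop_translator.length + 1) pv.1 = true
instance (props : List (String × String)) (prop_translator : List (String × Option (List String))) : Decidable (Pre_translate_props props prop_translator) := by unfold Pre_translate_props; infer_instance

def pvWitness_translate_props : (List (String × String)) × (List (String × Option (List String))) :=
  ([("a", "1"), ("d", "2")], [("a", some ["b", "c"]), ("b", some ["x"]), ("c", none)])

def Spec_translate_props (props : List (String × String)) (prop_translator : List (String × Option (List String))) (out : List (String × String)) : Prop := out = translate_props_alt props prop_translator
instance (props : List (String × String)) (prop_translator : List (String × Option (List String))) (out : List (String × String)) : Decidable (Spec_translate_props props prop_translator out) := by unfold Spec_translate_props; infer_instance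

-- ===== CLAIM (what is proved, stated in full; the proofs are below) =====
def Claim_equal_translate_props : Prop := ∀ (props : List (String × String)) (prop_translator : List (String × Option (List String))), Dom_translate_props props prop_translator → Pre_translate_props props prop_translator → Spec_translate_props props prop_translator (translate_props props prop_translator)

-- ===== LEMMAS AND PROOFS =====

-- the list of terminal names a single name expands to, reading chains up to depth f
def lv (tr : List (String × Option (List String))) : Nat → String → List String
  | 0, _ => []
  | f+1, k =>
    match (PySem.Dict.mk tr).get? k with
    | none => [k]
    | some none => []
    | some (some ns) => ns.flatMap (lv tr f)

-- size of the expansion tree up to depth f (bounds B's pop count)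
def csize (tr : List (String × Option (List String))) : Nat → String → Nat
  | 0, _ => 1
  | f+1, k =>
    match (PySem.Dict.mk tr).get? k with
    | some (some ns) => 1 + (ns.map (csize tr f)).sum
    | _ => 1

def insFold (L : List String) (v : String) (r : PySem.Dict String String) : PySem.Dict String String :=
  L.foldl (fun r n => r.insert n v) r

def dictOf (L : List String) (v : String) : PySem.Dict String String :=
  insFold L v PySem.Dict.empty

-- the per-property body of translateA at fuel G+1
def stepA (tr : List (String × Option (List String))) (fuel : Nat)
    (r : PySem.Dict String String) (pv : String × String) : PySem.Dict String String :=
  match (PySem.Dict.mk tr).get? pv.1 with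
  | some none => r
  | some (some names) =>
      names.foldl (fun r name => r.update (translateA tr fuel [(name, pv.2)]).items) r
  | none => r.insert pv.1 pv.2

theorem translateA_succ (tr : List (String × Option (List String))) (fuel : Nat)
    (props : List (String × String)) :
    translateA tr (fuel+1) props = props.foldl (stepA tr fuel) PySem.Dict.empty := rfl

theorem mem_of_get?_mk {ν : Type} (tr : List (String × ν)) (k : String) (v : ν)
    (h : (PySem.Dict.mk tr).get? k = some v) : (k, v) ∈ tr := by
  induction tr with
  | nil => simp [PySem.Dict.get?] at h
  | cons p rest ih =>
    obtain ⟨a, b⟩ := p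
    rw [PySem.Dict.get?_mk_cons] at h
    by_cases hk : (a == k) = true
    · simp [hk] at h
      simp [eq_of_beq hk, h]
    · simp [hk] at h
      exact List.mem_cons_of_mem _ (ih h)

theorem names_le_sum (tr : List (String × Option (List String)))
    (k : String) (names : List String) (h : (k, some names) ∈ tr) :
    names.length ≤ (tr.map (fun p => (p.2.getD []).length)).sum := by
  have : names.length ∈ tr.map (fun p => (p.2.getD []).length) :=
    List.mem_map.mpr ⟨(k, some names), h, rfl⟩
  exact List.le_sum_of_mem this

theorem aliasBounded_mono (tr : List (String × Option (List String))) :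
    ∀ f g k, aliasBounded tr f k = true → f ≤ g → aliasBounded tr g k = true := by
  intro f
  induction f with
  | zero =>
    intro g k hb _
    cases g with
    | zero => exact hb
    | succ g' =>
      unfold aliasBounded at hb ⊢
      cases hg : (PySem.Dict.mk tr).get? k with
      | none => simp
      | some o => cases o with
        | none => simp
        | some ns => simp [hg] at hb
  | succ f' ih =>
    intro g k hb hle
    obtain ⟨g', rfl⟩ : ∃ g', g = g' + 1 := ⟨g - 1, by omega⟩
    unfold aliasBounded at hb ⊢
    cases hg : (PySem.Dict.mk tr).get? k with
    | none => simp
    | some o => cases o with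
      | none => simp
      | some ns =>
        simp only [hg, List.all_eq_true] at hb ⊢
        intro n hn
        exact ih g' n (hb n hn) (by omega)

theorem lv_stable (tr : List (String × Option (List String))) :
    ∀ f k g, aliasBounded tr f k = true → f ≤ g → lv tr (f+1) k = lv tr (g+1) k := by
  intro f
  induction f with
  | zero =>
    intro k g hb _
    unfold aliasBounded at hb
    unfold lv
    cases hg : (PySem.Dict.mk tr).get? k with
    | none => simp
    | some o => cases o with
      | none => simp
      | some ns => simp [hg] at hb
  | succ f' ih =>
    intro k g hb hle
    obtain ⟨g', rfl⟩ : ∃ g', g = g' + 1 := ⟨g - 1, by omega⟩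
    unfold aliasBounded at hb
    show lv tr (f'+1+1) k = lv tr (g'+1+1) k
    unfold lv
    cases hg : (PySem.Dict.mk tr).get? k with
    | none => simp
    | some o => cases o with
      | none => simp
      | some ns =>
        simp only [hg, List.all_eq_true] at hb
        simp only [List.flatMap_def]
        rw [List.map_congr_left (fun n hn => ih n g' (hb n hn) (by omega))]

theorem csize_stable (tr : List (String × Option (List String))) :
    ∀ f k g, aliasBounded tr f k = true → f ≤ g → csize tr (f+1) k = csize tr (g+1) k := by
  intro f
  induction f with
  | zero =>
    intro k g hb _
    unfold aliasBounded at hb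
    unfold csize
    cases hg : (PySem.Dict.mk tr).get? k with
    | none => simp
    | some o => cases o with
      | none => simp
      | some ns => simp [hg] at hb
  | succ f' ih =>
    intro k g hb hle
    obtain ⟨g', rfl⟩ : ∃ g', g = g' + 1 := ⟨g - 1, by omega⟩
    unfold aliasBounded at hb
    show csize tr (f'+1+1) k = csize tr (g'+1+1) k
    unfold csize
    cases hg : (PySem.Dict.mk tr).get? k with
    | none => simp
    | some o => cases o with
      | none => simp
      | some ns =>
        simp only [hg, List.all_eq_true] at hb
        show 1 + (ns.map (csize tr (f'+1))).sum = 1 + (ns.map (csize tr (g'+1))).sum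
        rw [List.map_congr_left (fun n hn => ih n g' (hb n hn) (by omega))]

theorem csize_pos (tr : List (String × Option (List String))) (f : Nat) (k : String) :
    1 ≤ csize tr f k := by
  cases f with
  | zero => simp [csize]
  | succ f' =>
    unfold csize
    cases hg : (PySem.Dict.mk tr).get? k with
    | none => simp
    | some o => cases o with
      | none => simp
      | some ns =>
        show 1 ≤ 1 + (ns.map (csize tr f')).sum
        omega

theorem csize_le (tr : List (String × Option (List String))) :
    ∀ f k, csize tr f k ≤ ((tr.map (fun p => (p.2.getD []).length)).sum + 1) ^ f := by
  intro f
  induction f with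
  | zero => intro k; simp [csize]
  | succ f' ih =>
    intro k
    have hpow : 1 ≤ ((tr.map (fun p => (p.2.getD []).length)).sum + 1) ^ f' :=
      Nat.one_le_pow _ _ (by omega)
    unfold csize
    cases hg : (PySem.Dict.mk tr).get? k with
    | none =>
      simpa using Nat.one_le_pow _ _ (show 0 < (tr.map (fun p => (p.2.getD []).length)).sum + 1 by omega)
    | some o => cases o with
      | none =>
        simpa using Nat.one_le_pow _ _ (show 0 < (tr.map (fun p => (p.2.getD []).length)).sum + 1 by omega)
      | some ns =>
        simp only
        set T := (tr.map (fun p => (p.2.getD []).length)).sum with hT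
        have hlen : ns.length ≤ T := names_le_sum tr k ns (mem_of_get?_mk tr k (some ns) hg)
        have hsum : (ns.map (csize tr f')).sum ≤ ns.length * (T + 1) ^ f' := by
          have := List.sum_le_card_nsmul (ns.map (csize tr f')) ((T + 1) ^ f')
            (by intro x hx; obtain ⟨n, _, rfl⟩ := List.mem_map.mp hx; exact ih n)
          simpa using this
        calc 1 + (ns.map (csize tr f')).sum
            ≤ 1 + T * (T + 1) ^ f' := by
              have : ns.length * (T + 1) ^ f' ≤ T * (T + 1) ^ f' :=
                Nat.mul_le_mul_right _ hlen
              omega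
          _ ≤ (T + 1) ^ f' + T * (T + 1) ^ f' := by omega
          _ = (T + 1) ^ (f' + 1) := by ring

theorem values_dictOf (L : List String) (v : String) :
    ∀ x ∈ (dictOf L v).items, x.2 = v := by
  induction L using List.reverseRecOn with
  | nil => simp [dictOf, insFold, PySem.Dict.empty]
  | append_singleton L n ih =>
    have hd : dictOf (L ++ [n]) v = (dictOf L v).insert n v := by
      simp [dictOf, insFold, List.foldl_append]
    rw [hd]
    intro x hx
    rcases (PySem.Dict.mem_items_insert _ _ _ _).mp hx with h | ⟨h, _⟩
    · simp [h]
    · exact ih x h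

theorem nodup_insFold (L : List String) (v : String) (r : PySem.Dict String String)
    (hr : r.keys.Nodup) : (insFold L v r).keys.Nodup :=
  PySem.Dict.nodup_keys_foldl_insert L (fun _ _ => v) r hr

theorem nodup_dictOf (L : List String) (v : String) : (dictOf L v).keys.Nodup :=
  nodup_insFold L v PySem.Dict.empty (by simp [PySem.Dict.keys, PySem.Dict.empty])

theorem keys_dictOf_sub (L : List String) (v : String) :
    ∀ n ∈ (dictOf L v).keys, n ∈ L := by
  induction L using List.reverseRecOn with
  | nil => simp [dictOf, insFold, PySem.Dict.empty, PySem.Dict.keys]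
  | append_singleton L m ih =>
    have hd : dictOf (L ++ [m]) v = (dictOf L v).insert m v := by
      simp [dictOf, insFold, List.foldl_append]
    rw [hd]
    intro n hn
    rcases (PySem.Dict.mem_keys_insert _ _ _ _).mp hn with h | h
    · simp [h]
    · exact List.mem_append_left _ (ih n h)

theorem insert_same (d : PySem.Dict String String) (k v : String)
    (hnd : d.keys.Nodup) (hg : d.get? k = some v) : d.insert k v = d := by
  have hc : d.contains k = true := by
    rw [PySem.Dict.contains_eq_isSome_get?, hg]; rfl
  apply PySem.Dict.ext
  rw [PySem.Dict.items_insert_of_contains d v hc]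
  have : ∀ p ∈ d.items, (if (p.1 == k) = true then (k, v) else p) = p := by
    intro p hp
    by_cases hpk : (p.1 == k) = true
    · have hk1 : p.1 = k := eq_of_beq hpk
      have h2 : d.get? p.1 = some p.2 := PySem.Dict.get?_of_mem_items d (by simpa using hp) hnd
      rw [hk1, hg] at h2
      have hv : v = p.2 := by simpa using h2
      simp [← hk1, hv]
    · simp [hpk]
  rw [List.map_congr_left this]
  simp

theorem get?_insFold_mem (v : String) :
    ∀ (L : List String) (r : PySem.Dict String String) (n : String),
      (r.get? n = some v ∨ n ∈ L) → (insFold L v r).get? n = some v := by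
  intro L
  induction L with
  | nil => intro r n h; simpa [insFold] using h.resolve_right (by simp)
  | cons m L' ih =>
    intro r n h
    show (insFold L' v (r.insert m v)).get? n = some v
    apply ih
    by_cases hnm : n = m
    · left; rw [hnm]; exact PySem.Dict.get?_insert_self r m v
    · rcases h with h | h
      · left; rw [PySem.Dict.get?_insert_of_ne r v hnm]; exact h
      · rcases List.mem_cons.mp h with h' | h'
        · exact absurd h' hnm
        · right; exact h'

theorem update_dictOf (v : String) :
    ∀ (L : List String) (r : PySem.Dict String String), r.keys.Nodup →
      r.update (dictOf L v).items = insFold L v r := by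
  intro L
  induction L using List.reverseRecOn with
  | nil => intro r _; simp [dictOf, insFold, PySem.Dict.empty, PySem.Dict.update]
  | append_singleton L n ih =>
    intro r hr
    have hd : dictOf (L ++ [n]) v = (dictOf L v).insert n v := by
      simp [dictOf, insFold, List.foldl_append]
    have hins : insFold (L ++ [n]) v r = (insFold L v r).insert n v := by
      simp [insFold, List.foldl_append]
    rw [hd, hins]
    cases hc : (dictOf L v).contains n with
    | false =>
      rw [PySem.Dict.items_insert_of_not_contains _ v hc]
      show List.foldl _ r _ = _
      rw [List.foldl_append]
      show (r.update (dictOf L v).items).insert n v = _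
      rw [ih r hr]
    | true =>
      -- the entry for n in dictOf L v already has value v, so the insert is a no-op on both sides
      have hsome : ∃ w, (dictOf L v).get? n = some w := by
        have := PySem.Dict.contains_eq_isSome_get? (dictOf L v) n
        rw [hc] at this
        cases hg : (dictOf L v).get? n with
        | none => rw [hg] at this; simp at this
        | some w => exact ⟨w, rfl⟩
      obtain ⟨w, hw⟩ := hsome
      have hwv : w = v :=
        values_dictOf L v (n, w) (PySem.Dict.mem_items_of_get?_eq_some _ hw)
      rw [insert_same (dictOf L v) n v (nodup_dictOf L v) (hwv ▸ hw)]
      rw [ih r hr]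
      have hnL : n ∈ L := keys_dictOf_sub L v n
        ((PySem.Dict.contains_iff_mem_keys _ _).mp hc)
      exact (insert_same (insFold L v r) n v (nodup_insFold L v r hr)
        (get?_insFold_mem v L r n (Or.inr hnL))).symm

-- A's per-property body computes the insert-fold of the expansion list
theorem mainA (tr : List (String × Option (List String))) (v : String) :
    ∀ f k G r, aliasBounded tr f k = true → f + 1 ≤ G → r.keys.Nodup →
      stepA tr G r (k, v) = insFold (lv tr (f+1) k) v r := by
  intro f
  induction f with
  | zero =>
    intro k G r hb _ _
    unfold aliasBounded at hb
    unfold stepA lv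
    cases hg : (PySem.Dict.mk tr).get? k with
    | none => simp [insFold]
    | some o => cases o with
      | none => simp [insFold]
      | some ns => simp [hg] at hb
  | succ f' ih =>
    intro k G r hb hG hr
    obtain ⟨G', rfl⟩ : ∃ G', G = G' + 1 := ⟨G - 1, by omega⟩
    unfold aliasBounded at hb
    unfold stepA
    cases hg : (PySem.Dict.mk tr).get? k with
    | none => show r.insert k v = _; simp [lv, hg, insFold]
    | some o => cases o with
      | none => show r = _; simp [lv, hg, insFold]
      | some ns =>
        simp only [hg, List.all_eq_true] at hb
        show ns.foldl (fun r name => r.update (translateA tr (G'+1) [(name, v)]).items) r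
            = insFold (lv tr (f'+1+1) k) v r
        have hlv : lv tr (f'+1+1) k = ns.flatMap (lv tr (f'+1)) := by
          show lv tr (f'+2) k = _
          unfold lv
          rw [hg]
        rw [hlv]
        clear hlv hg
        induction ns generalizing r with
        | nil => simp [insFold]
        | cons n rest ihn =>
          have hrec : translateA tr (G'+1) [(n, v)] = dictOf (lv tr (f'+1) n) v := by
            rw [translateA_succ]
            show stepA tr G' PySem.Dict.empty (n, v) = _
            rw [ih n G' PySem.Dict.empty (hb n (by simp)) (by omega)
              (by simp [PySem.Dict.keys, PySem.Dict.empty])]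
            rfl
          show rest.foldl _ (r.update (translateA tr (G'+1) [(n, v)]).items) = _
          rw [hrec, update_dictOf v _ r hr]
          rw [List.flatMap_cons]
          have : insFold (lv tr (f'+1) n ++ rest.flatMap (lv tr (f'+1))) v r
              = insFold (rest.flatMap (lv tr (f'+1))) v (insFold (lv tr (f'+1) n) v r) := by
            simp [insFold, List.foldl_append]
          rw [this]
          exact ihn (insFold (lv tr (f'+1) n) v r) (nodup_insFold _ v r hr)
            (fun m hm => hb m (List.mem_cons_of_mem _ hm))

-- B's worklist computes the insert-fold of the concatenated expansion lists
theorem mainB (tr : List (String × Option (List String))) (v : String) (N : Nat) :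
    ∀ fuel stack res, (∀ k ∈ stack, aliasBounded tr N k = true) →
      (stack.map (csize tr (N+1))).sum ≤ fuel →
      bLoop tr v fuel stack res = insFold (stack.flatMap (lv tr (N+1))) v res := by
  intro fuel
  induction fuel with
  | zero =>
    intro stack res _ hcost
    cases stack with
    | nil => simp [bLoop, insFold]
    | cons k rest =>
      exfalso
      have := csize_pos tr (N+1) k
      simp [List.map_cons] at hcost
      omega
  | succ g ih =>
    intro stack res hbd hcost
    cases stack with
    | nil => simp [bLoop, insFold]
    | cons k rest =>
      have hbk := hbd k (by simp)
      show bLoop tr v (g+1) (k :: rest) res = _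
      unfold bLoop
      cases hg : (PySem.Dict.mk tr).get? k with
      | none =>
        rw [ih rest (res.insert k v) (fun m hm => hbd m (by simp [hm]))
          (by have hp := csize_pos tr (N+1) k; simp [List.map_cons] at hcost; omega)]
        have hlv : lv tr (N+1) k = [k] := by unfold lv; rw [hg]
        simp [hlv, insFold]
      | some o => cases o with
        | none =>
          rw [ih rest res (fun m hm => hbd m (by simp [hm]))
            (by have hp := csize_pos tr (N+1) k; simp [List.map_cons] at hcost; omega)]
          have hlv : lv tr (N+1) k = [] := by unfold lv; rw [hg]
          simp [hlv]
        | some ns =>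
          obtain ⟨N', rfl⟩ : ∃ N', N = N' + 1 := by
            cases N with
            | zero => unfold aliasBounded at hbk; rw [hg] at hbk; simp at hbk
            | succ N' => exact ⟨N', rfl⟩
          have hbns : ∀ n ∈ ns, aliasBounded tr N' n = true := by
            unfold aliasBounded at hbk
            rw [hg] at hbk
            simpa [List.all_eq_true] using hbk
          have hbd' : ∀ m ∈ ns ++ rest, aliasBounded tr (N'+1) m = true := by
            intro m hm
            rcases List.mem_append.mp hm with h | h
            · exact aliasBounded_mono tr N' (N'+1) m (hbns m h) (by omega)
            · exact hbd m (by simp [h])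
          have hstab : ∀ n ∈ ns, csize tr (N'+1+1) n = csize tr (N'+1) n := by
            intro n hn
            exact (csize_stable tr N' n (N'+1) (hbns n hn) (by omega)).symm
          have hck : csize tr (N'+1+1) k = 1 + (ns.map (csize tr (N'+1))).sum := by
            show csize tr (N'+2) k = _
            unfold csize
            rw [hg]
          have hcost' : ((ns ++ rest).map (csize tr (N'+1+1))).sum ≤ g := by
            rw [List.map_append, List.sum_append, List.map_congr_left hstab]
            simp [List.map_cons, hck] at hcost ⊢
            omega
          show bLoop tr v g (ns ++ rest) res
              = insFold ((k :: rest).flatMap (lv tr (N'+1+1))) v res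
          rw [ih (ns ++ rest) res hbd' hcost']
          have hlvk : lv tr (N'+1+1) k = ns.flatMap (lv tr (N'+1)) := by
            show lv tr (N'+2) k = _
            unfold lv
            rw [hg]
          have hlvs : ∀ n ∈ ns, lv tr (N'+1+1) n = lv tr (N'+1) n := by
            intro n hn
            exact (lv_stable tr N' n (N'+1) (hbns n hn) (by omega)).symm
          rw [List.flatMap_append, List.flatMap_cons, hlvk]
          congr 2
          simp only [List.flatMap_def]
          rw [List.map_congr_left (fun n hn => hlvs n hn)]

-- both top-level folds equal the common canonical fold
theorem foldA_eq (tr : List (String × Option (List String))) :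
    ∀ (props : List (String × String)) (r : PySem.Dict String String),
      (∀ pv ∈ props, aliasBounded tr (tr.length + 1) pv.1 = true) → r.keys.Nodup →
      props.foldl (stepA tr (tr.length + 2)) r
        = props.foldl (fun r pv => insFold (lv tr (tr.length + 2) pv.1) pv.2 r) r := by
  intro props
  induction props with
  | nil => intro r _ _; rfl
  | cons pv rest ih =>
    intro r hbd hr
    show rest.foldl _ (stepA tr (tr.length + 2) r pv) = _
    have h1 : stepA tr (tr.length + 2) r pv
        = insFold (lv tr (tr.length + 2) pv.1) pv.2 r := by
      have := mainA tr pv.2 (tr.length + 1) pv.1 (tr.length + 2) r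
        (hbd pv (by simp)) (by omega) hr
      simpa using this
    rw [h1]
    exact ih _ (fun q hq => hbd q (by simp [hq])) (nodup_insFold _ _ r hr)

theorem foldB_eq (tr : List (String × Option (List String)))
    (props : List (String × String)) (r : PySem.Dict String String)
    (hbd : ∀ pv ∈ props, aliasBounded tr (tr.length + 1) pv.1 = true) :
    props.foldl (fun res pv => bLoop tr pv.2 (bFuel tr) [pv.1] res) r
      = props.foldl (fun r pv => insFold (lv tr (tr.length + 2) pv.1) pv.2 r) r := by
  apply PySem.List.foldl_congr_mem
  intro res pv hpv
  have hcost : ([pv.1].map (csize tr (tr.length + 1 + 1))).sum ≤ bFuel tr := by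
    simp only [List.map_cons, List.map_nil, List.sum_cons, List.sum_nil, Nat.add_zero]
    calc csize tr (tr.length + 1 + 1) pv.1
        ≤ ((tr.map (fun p => (p.2.getD []).length)).sum + 1) ^ (tr.length + 1 + 1) :=
          csize_le tr _ pv.1
      _ ≤ bFuel tr := by
          unfold bFuel
          exact Nat.pow_le_pow_right (by omega) (by omega)
  have := mainB tr pv.2 (tr.length + 1) (bFuel tr) [pv.1] res
    (by intro m hm; simp at hm; rw [hm]; exact hbd pv hpv) hcost
  rw [this]
  simp

-- ===== VERDICT (by name: the statement is the Claim_ definition above) =====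
theorem translate_props_spec : Claim_equal_translate_props := by
  intro props tr _ hpre
  unfold Spec_translate_props translate_props translate_props_alt
  have hA : translateA tr (tr.length + 3) props
      = props.foldl (stepA tr (tr.length + 2)) PySem.Dict.empty :=
    translateA_succ tr (tr.length + 2) props
  rw [hA, foldA_eq tr props PySem.Dict.empty hpre (by simp [PySem.Dict.keys, PySem.Dict.empty]),
    foldB_eq tr props PySem.Dict.empty hpre]
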